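-- pv_equiv track=rewrite | github.com/phungkhactubg/ai-dlc-demo | .github/skills/expert-java-backend-developer/scripts/generate_quality_report.py | _parse_text_output
-- ===== SOURCE A (Python) =====
-- from typing import List, Dict, Any, Optional, Tuple
--
-- def _parse_text_output(output: str, script_name: str) -> Dict:
--     """Fallback parser for text output."""
--     data = {"summary": {}, "issues": []}
--
--     lines = output.split('\n')
--     for line in lines:
--         if "CRITICAL:" in line:
--             try:
--                 data["summary"]["critical"] = int(line.split("CRITICAL:")[1].strip().split()[0])
--             except:
--                 pass
--         elif "ERROR:" in line:
--             try:
--                 data["summary"]["error"] = int(line.split("ERROR:")[1].strip().split()[0])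
--             except:
--                 pass
--         elif "WARNING:" in line:
--             try:
--                 data["summary"]["warning"] = int(line.split("WARNING:")[1].strip().split()[0])
--             except:
--                 pass
--         elif "files checked:" in line.lower():
--             try:
--                 data["summary"]["files_checked"] = int(line.split("checked:")[1].strip())
--             except:
--                 pass
--
--     return data
-- ===== SOURCE B (Python) =====
-- def _classify(line):
--     """Classify one line into an optional (summary_key, value) event, or None."""
--     for marker, key in (("CRITICAL:", "critical"), ("ERROR:", "error"), ("WARNING:", "warning")):
--         if marker in line:
--             try:
--                 return (key, int(line.split(marker)[1].strip().split()[0]))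
--             except Exception:
--                 return None
--     if "files checked:" in line.lower():
--         try:
--             return ("files_checked", int(line.split("checked:")[1].strip()))
--         except Exception:
--             return None
--     return None
--
--
-- def _parse_text_output(output: str, script_name: str):
--     """Staged parser: classify lines into an event list, then rebuild the summary
--     (keys in order of first appearance, value from the last event per key) with no
--     mutable dict updates."""
--     events = [ev for ev in (_classify(l) for l in output.split('\n')) if ev is not None]
--     order = []
--     for k, _ in events:
--         if k not in order:
--             order.append(k)
--     summary = {k: [v for k2, v in events if k2 == k][-1] for k in order}
--     return {"summary": summary, "issues": []}
-- ===== Notes on version B (the rewrite author's own statement) =====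
-- stated objective: alternative
-- what changed: Replaces A's single pass that mutates a summary dict line by line with a staged pipeline: a pure classifier maps each line to an optional (key, value) event, and the summary is then rebuilt from the event list with no dict updates at all — keys in order of first appearance, each paired with the value of its last event.
import Mathlib
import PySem

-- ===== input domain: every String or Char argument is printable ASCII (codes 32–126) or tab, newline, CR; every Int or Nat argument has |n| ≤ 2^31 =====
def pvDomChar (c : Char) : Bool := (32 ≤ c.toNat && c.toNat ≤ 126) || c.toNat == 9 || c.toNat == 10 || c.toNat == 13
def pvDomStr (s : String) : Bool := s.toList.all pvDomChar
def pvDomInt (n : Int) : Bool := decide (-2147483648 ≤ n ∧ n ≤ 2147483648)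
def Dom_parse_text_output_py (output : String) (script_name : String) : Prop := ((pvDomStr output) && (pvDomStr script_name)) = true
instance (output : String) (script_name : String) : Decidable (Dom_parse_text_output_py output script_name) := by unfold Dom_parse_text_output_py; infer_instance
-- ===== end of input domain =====

-- B replaces A's dict-mutating line loop by a staged pipeline (classify lines into events,
-- then rebuild the summary from the event list); same behaviour, similar cost.

-- ===== PORT A =====
-- str.split(sep) for a nonempty literal sep (PySem.Str.split? is none only for sep = "")
def pvSplit (s sep : String) : List String := (PySem.Str.split? s sep).getD []

-- the body of A's `for line in lines` loop: the if/elif chain, each branch a try/int-parse (none = exception, pass)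
def pvStepA (d : PySem.Dict String Int) (line : String) : PySem.Dict String Int :=
  if PySem.Str.isIn "CRITICAL:" line then
    match ((PySem.List.pyGet? (pvSplit line "CRITICAL:") 1).bind fun p =>
           (PySem.List.pyGet? (PySem.Str.split₀ (PySem.Str.strip p)) 0).bind fun t =>
           PySem.Int.ofStr? t) with
    | some n => d.insert "critical" n
    | none => d
  else if PySem.Str.isIn "ERROR:" line then
    match ((PySem.List.pyGet? (pvSplit line "ERROR:") 1).bind fun p =>
           (PySem.List.pyGet? (PySem.Str.split₀ (PySem.Str.strip p)) 0).bind fun t =>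
           PySem.Int.ofStr? t) with
    | some n => d.insert "error" n
    | none => d
  else if PySem.Str.isIn "WARNING:" line then
    match ((PySem.List.pyGet? (pvSplit line "WARNING:") 1).bind fun p =>
           (PySem.List.pyGet? (PySem.Str.split₀ (PySem.Str.strip p)) 0).bind fun t =>
           PySem.Int.ofStr? t) with
    | some n => d.insert "warning" n
    | none => d
  else if PySem.Str.isIn "files checked:" (PySem.Str.lower line) then
    match ((PySem.List.pyGet? (pvSplit line "checked:") 1).bind fun p =>
           PySem.Int.ofStr? (PySem.Str.strip p)) with
    | some n => d.insert "files_checked" n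
    | none => d
  else d

def parse_text_output_py (output : String) (script_name : String) : List (String × List (String × Int)) :=
  let lines := pvSplit output "\n"
  let summary : PySem.Dict String Int := lines.foldl pvStepA PySem.Dict.empty
  [("summary", summary.items), ("issues", [])]

-- ===== PORT B =====
-- `int(line.split(marker)[1].strip().split()[0])` from _classify's marker loop (none = exception)
def pvParseTok (line marker : String) : Option Int :=
  (PySem.List.pyGet? (pvSplit line marker) 1).bind fun p =>
  (PySem.List.pyGet? (PySem.Str.split₀ (PySem.Str.strip p)) 0).bind fun t =>
  PySem.Int.ofStr? t

-- _classify's `for marker, key in …` loop with its early returns, then the files-checked tail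
def pvClassifyAux : List (String × String) → String → Option (String × Int)
  | [], line =>
    if PySem.Str.isIn "files checked:" (PySem.Str.lower line) then
      match ((PySem.List.pyGet? (pvSplit line "checked:") 1).bind fun p =>
             PySem.Int.ofStr? (PySem.Str.strip p)) with
      | some n => some ("files_checked", n)
      | none => none
    else none
  | (marker, key) :: rest, line =>
    if PySem.Str.isIn marker line then
      match pvParseTok line marker with
      | some n => some (key, n)
      | none => none
    else pvClassifyAux rest line

def pvClassify (line : String) : Option (String × Int) :=
  pvClassifyAux [("CRITICAL:", "critical"), ("ERROR:", "error"), ("WARNING:", "warning")] line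

-- `order`: keys in order of first appearance in the event list
def pvOrder (events : List (String × Int)) : List String :=
  events.foldl (fun acc kv => if kv.1 ∈ acc then acc else acc ++ [kv.1]) []

-- `[v for k2, v in events if k2 == k][-1]` (the default is unreachable: k comes from pvOrder)
def pvLastVal (events : List (String × Int)) (k : String) : Int :=
  (PySem.List.pyGet? ((events.filter (fun e => e.1 == k)).map (·.2)) (-1)).getD 0

def parse_text_output_py_alt (output : String) (script_name : String) : List (String × List (String × Int)) :=
  let events := (pvSplit output "\n").filterMap pvClassify
  let summary := (pvOrder events).map (fun k => (k, pvLastVal events k))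
  [("summary", summary), ("issues", [])]

-- ===== PRECONDITION & SPEC =====
def Spec_parse_text_output_py (output : String) (script_name : String) (out : List (String × List (String × Int))) : Prop := out = parse_text_output_py_alt output script_name
instance (output : String) (script_name : String) (out : List (String × List (String × Int))) : Decidable (Spec_parse_text_output_py output script_name out) := by unfold Spec_parse_text_output_py; infer_instance

-- ===== CLAIM (what is proved, stated in full; the proofs are below) =====
def Claim_equal_parse_text_output_py : Prop := ∀ (output : String) (script_name : String), Dom_parse_text_output_py output script_name → Spec_parse_text_output_py output script_name (parse_text_output_py output script_name)

-- ===== LEMMAS AND PROOFS =====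

-- A's loop body is exactly "insert the classified event, if any"
lemma stepA_eq_classify (d : PySem.Dict String Int) (line : String) :
    pvStepA d line = match pvClassify line with
      | some kv => d.insert kv.1 kv.2
      | none => d := by
  unfold pvStepA pvClassify
  rw [pvClassifyAux, pvClassifyAux, pvClassifyAux, pvClassifyAux]
  split_ifs with h1 h2 h3 h4
  · cases hp : pvParseTok line "CRITICAL:" <;> simp only [pvParseTok] at hp <;> rw [hp]
  · cases hp : pvParseTok line "ERROR:" <;> simp only [pvParseTok] at hp <;> rw [hp]
  · cases hp : pvParseTok line "WARNING:" <;> simp only [pvParseTok] at hp <;> rw [hp]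
  · cases hp : ((PySem.List.pyGet? (pvSplit line "checked:") 1).bind fun p =>
        PySem.Int.ofStr? (PySem.Str.strip p)) <;> rfl
  · rfl

-- folding A's step over lines = folding plain insert over the classified events
lemma foldl_stepA_eq (lines : List String) (d : PySem.Dict String Int) :
    lines.foldl pvStepA d =
      (lines.filterMap pvClassify).foldl (fun d kv => d.insert kv.1 kv.2) d := by
  induction lines generalizing d with
  | nil => rfl
  | cons l ls ih =>
    simp only [List.foldl_cons, List.filterMap_cons, stepA_eq_classify]
    cases pvClassify l <;> simp [ih]

lemma pvOrder_append (es : List (String × Int)) (e : String × Int) :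
    pvOrder (es ++ [e]) = if e.1 ∈ pvOrder es then pvOrder es else pvOrder es ++ [e.1] := by
  unfold pvOrder
  rw [List.foldl_append]
  rfl

lemma pvLastVal_append_self (es : List (String × Int)) (e : String × Int) :
    pvLastVal (es ++ [e]) e.1 = e.2 := by
  unfold pvLastVal
  rw [List.filter_append, List.map_append]
  simp [PySem.List.pyGet?_neg_one_append_singleton]

lemma pvLastVal_append_ne (es : List (String × Int)) (e : String × Int) (k : String)
    (h : k ≠ e.1) : pvLastVal (es ++ [e]) k = pvLastVal es k := by
  unfold pvLastVal
  rw [List.filter_append]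
  have he : (e.1 == k) = false := by simpa using Ne.symm h
  simp [List.filter, he]

-- the heart of the proof: the mutated dict's items ARE B's reconstruction from the events
lemma items_foldl_insert (es : List (String × Int)) :
    ((es.foldl (fun d kv => d.insert kv.1 kv.2) (PySem.Dict.empty : PySem.Dict String Int)).items)
      = (pvOrder es).map (fun k => (k, pvLastVal es k)) := by
  induction es using List.reverseRecOn with
  | nil => rfl
  | append_singleton es e ih =>
    rw [List.foldl_append, List.foldl_cons, List.foldl_nil, pvOrder_append]
    set d := es.foldl (fun d kv => d.insert kv.1 kv.2) (PySem.Dict.empty : PySem.Dict String Int) with hd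
    have hkeys : d.keys = pvOrder es := by
      simp only [PySem.Dict.keys, ih, List.map_map]
      simp [Function.comp_def]
    by_cases hmem : e.1 ∈ pvOrder es
    · have hc : d.contains e.1 = true := by
        rw [PySem.Dict.contains_eq_decide_mem_keys, hkeys]; simpa using hmem
      rw [if_pos hmem, PySem.Dict.items_insert_of_contains _ _ hc, ih, List.map_map]
      apply List.map_congr_left
      intro k _
      by_cases hk : k = e.1
      · subst hk
        simp [pvLastVal_append_self]
      · simp [Function.comp, hk, pvLastVal_append_ne es e k hk]
    · have hc : d.contains e.1 = false := by
        rw [PySem.Dict.contains_eq_decide_mem_keys, hkeys]; simpa using hmem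
      rw [if_neg hmem, PySem.Dict.items_insert_of_not_contains _ _ hc, ih, List.map_append]
      congr 1
      · apply List.map_congr_left
        intro k hk
        have : k ≠ e.1 := fun h => hmem (h ▸ hk)
        rw [pvLastVal_append_ne es e k this]
      · simp [pvLastVal_append_self]

theorem parse_text_output_py_spec : Claim_equal_parse_text_output_py := by
  intro output script_name _
  unfold Spec_parse_text_output_py parse_text_output_py parse_text_output_py_alt
  simp only [foldl_stepA_eq, items_foldl_insert]
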